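-- pv_equiv track=rewrite | github.com/evdokiaa/NeuralNetworks | code_ex2.py | thorough_filter
-- ===== SOURCE A (Python) =====
-- import string
--
-- def thorough_filter(words):
--     optimised_words = []
--     for word in words:
--         pun = []
--         for letter in word:
--             pun.append(letter in string.punctuation)
--         if True not in pun:
--             optimised_words.append(word)
--     return optimised_words
-- ===== SOURCE B (Python) =====
-- import string
--
-- # Table that deletes every punctuation character.
-- _DEL = str.maketrans('', '', string.punctuation)
--
-- def thorough_filter(words):
--     # Keep a word iff deleting all punctuation from it leaves it unchanged.
--     return [word for word in words if word.translate(_DEL) == word]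
-- ===== Notes on version B (the rewrite author's own statement) =====
-- stated objective: idiomatic
-- what changed: Instead of building a per-word boolean list and scanning it with 'True not in', B deletes all punctuation from each word via a str.translate deletion table and keeps the word iff the transformed string equals the original (transform-and-compare instead of membership scanning).
import Mathlib
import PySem

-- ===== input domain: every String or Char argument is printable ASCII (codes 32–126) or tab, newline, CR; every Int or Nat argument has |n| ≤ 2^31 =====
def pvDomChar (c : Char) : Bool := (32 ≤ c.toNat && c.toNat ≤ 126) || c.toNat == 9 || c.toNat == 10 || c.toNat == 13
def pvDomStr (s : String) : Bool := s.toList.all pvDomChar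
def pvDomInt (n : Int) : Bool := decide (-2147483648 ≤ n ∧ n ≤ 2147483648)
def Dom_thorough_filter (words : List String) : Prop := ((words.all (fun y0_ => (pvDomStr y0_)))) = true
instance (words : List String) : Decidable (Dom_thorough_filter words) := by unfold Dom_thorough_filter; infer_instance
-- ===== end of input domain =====

-- B replaces A's per-word boolean list and 'True not in' scan by a transform-and-compare:
-- delete all punctuation from the word (str.translate) and keep it iff it is unchanged (objective: idiomatic).

-- string.punctuation
def pvPunct : List Char := "!\"#$%&'()*+,-./:;<=>?@[\\]^_`{|}~".toList

-- ===== PORT A =====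
def thorough_filter (words : List String) : List String :=
  words.foldl (fun optimised_words word =>
    let pun : List Bool :=
      word.toList.foldl (fun pun letter => pun ++ [pvPunct.contains letter]) []
    if pun.contains true then optimised_words
    else optimised_words ++ [word]) []

-- ===== PORT B =====
-- word.translate(_DEL): delete every punctuation character (ported by hand as a character
-- filter, which is exact for a str.maketrans('', '', punct) deletion table on these strings)
def pvTranslateDel (s : String) : String :=
  String.ofList (s.toList.filter (fun c => !pvPunct.contains c))

def thorough_filter_alt (words : List String) : List String :=
  words.filter (fun word => pvTranslateDel word == word)

-- ===== PRECONDITION & SPEC =====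
def Spec_thorough_filter (words : List String) (out : List String) : Prop := out = thorough_filter_alt words
instance (words : List String) (out : List String) : Decidable (Spec_thorough_filter words out) := by unfold Spec_thorough_filter; infer_instance

-- ===== CLAIM =====
def Claim_equal_thorough_filter : Prop := ∀ (words : List String), Dom_thorough_filter words → Spec_thorough_filter words (thorough_filter words)

-- ===== LEMMAS AND PROOFS =====

-- A's per-word test is the negation of B's unchanged-after-deletion test
theorem pv_word_test (word : String) :
    ((word.toList.foldl (fun pun letter => pun ++ [pvPunct.contains letter]) []).contains true)
      = !(pvTranslateDel word == word) := by
  rw [PySem.List.foldl_append_singleton_eq_map, Bool.eq_iff_iff]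
  simp [pvTranslateDel, String.ext_iff, List.filter_eq_self]

theorem pv_fold_filter (words : List String) (acc : List String) :
    words.foldl (fun optimised_words word =>
      let pun : List Bool :=
        word.toList.foldl (fun pun letter => pun ++ [pvPunct.contains letter]) []
      if pun.contains true then optimised_words
      else optimised_words ++ [word]) acc
    = acc ++ words.filter (fun word => pvTranslateDel word == word) := by
  induction words generalizing acc with
  | nil => simp
  | cons w ws ih =>
    rw [List.foldl_cons]
    show List.foldl _ (if ((w.toList.foldl (fun pun letter => pun ++ [pvPunct.contains letter]) []).contains true) then acc else acc ++ [w]) ws = _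
    rw [pv_word_test]
    cases h : (pvTranslateDel w == w)
    · rw [if_pos (show (!false) = true from rfl), ih, List.filter_cons]
      simp [h]
    · rw [if_neg (show ¬((!true) = true) from by decide), ih, List.filter_cons]
      simp [h]

-- ===== VERDICT =====
theorem thorough_filter_spec : Claim_equal_thorough_filter := by
  intro words _
  unfold Spec_thorough_filter thorough_filter thorough_filter_alt
  simpa using pv_fold_filter words []
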